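-- pv_equiv track=rewrite | github.com/cheney888-cyn/S-AES_2023 | Extended_sAes.py | split_into_16_bit_groups
-- ===== SOURCE A (Python) =====
-- def split_into_16_bit_groups(number):
--     # 初始化一个空列表，用于存储分组结果
--     groups = []
--     res = []
--     # 使用位运算将32位整数分成16位一组，并依次添加到列表中
--     for _ in range(2):
--         group = number & 0xFFFF  # 获取低16位
--         groups.append(group)
--         number >>= 16  # 将整数右移16位，处理下一组
--     # 将groups 中的元素从末尾依次取出，添加到res中
--     for i in range(len(groups)):
--         res.append(groups.pop())
--     return res
-- ===== SOURCE B (Python) =====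
-- def split_into_16_bit_groups(number):
--     # Closed form: high 16 bits first, then low 16 bits.
--     return [(number >> 16) & 0xFFFF, number & 0xFFFF]
-- ===== Notes on version B (the rewrite author's own statement) =====
-- stated objective: simpler
-- what changed: Replaces the two loops (accumulate low-to-high, then pop-reverse) with a single closed-form expression that builds [high16, low16] directly.
import Mathlib
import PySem

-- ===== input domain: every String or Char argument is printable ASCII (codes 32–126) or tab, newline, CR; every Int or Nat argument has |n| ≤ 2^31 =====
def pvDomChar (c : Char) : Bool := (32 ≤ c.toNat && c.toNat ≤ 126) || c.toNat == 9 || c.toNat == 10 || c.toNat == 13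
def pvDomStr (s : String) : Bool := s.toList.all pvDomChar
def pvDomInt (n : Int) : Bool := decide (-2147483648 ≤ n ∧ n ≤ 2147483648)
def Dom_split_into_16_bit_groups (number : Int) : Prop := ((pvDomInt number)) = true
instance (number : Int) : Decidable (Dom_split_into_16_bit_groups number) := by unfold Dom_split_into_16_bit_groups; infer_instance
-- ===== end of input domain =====

-- B replaces A's append-then-pop-reverse loops with one closed-form list [high16, low16] (simpler).


-- ===== PORT A =====
-- loop 1: for _ in range(2): groups.append(number & 0xFFFF); number >>= 16
-- loop 2: for i in range(len(groups)): res.append(groups.pop())   (pop() = pop? with default index -1)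
def split_into_16_bit_groups (number : Int) : List Int :=
  let st := (PySem.List.pyRange 0 2 1).foldl
    (fun (st : List Int × Int) _ =>
      (st.1 ++ [PySem.Int.band st.2 0xFFFF], PySem.Int.floordiv st.2 65536)) ([], number)
  let groups := st.1
  let st2 := (PySem.List.pyRange 0 (groups.length : Int) 1).foldl
    (fun (st : List Int × List Int) _ =>
      match PySem.List.pop? st.1 (-1) with
      | some (v, rest) => (rest, st.2 ++ [v])
      | none => st) (groups, [])
  st2.2

-- ===== PORT B =====
def split_into_16_bit_groups_alt (number : Int) : List Int :=
  [PySem.Int.band (PySem.Int.floordiv number 65536) 0xFFFF, PySem.Int.band number 0xFFFF]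

-- ===== PRECONDITION & SPEC =====
def Spec_split_into_16_bit_groups (number : Int) (out : List Int) : Prop := out = split_into_16_bit_groups_alt number
instance (number : Int) (out : List Int) : Decidable (Spec_split_into_16_bit_groups number out) := by unfold Spec_split_into_16_bit_groups; infer_instance

-- ===== CLAIM (what is proved, stated in full; the proofs are below) =====
def Claim_equal_split_into_16_bit_groups : Prop := ∀ (number : Int), Dom_split_into_16_bit_groups number → Spec_split_into_16_bit_groups number (split_into_16_bit_groups number)

-- ===== LEMMAS AND PROOFS =====

-- ===== VERDICT (by name: the statement is the Claim_ definition above) =====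
theorem split_into_16_bit_groups_spec : Claim_equal_split_into_16_bit_groups := by
  intro n _
  show _ = _
  simp [split_into_16_bit_groups, split_into_16_bit_groups_alt, PySem.List.pyRange,
    PySem.List.pop?, PySem.List.pyIdx?, List.range_succ]
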